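-- pv_equiv track=rewrite | github.com/hitaxim/leetcode-learnings | Python-Interview-Questions/Facebook - Video Ads Insertion.py | can_insert_ads
-- ===== SOURCE A (Python) =====
-- def can_insert_ads(feed_items, n):
--     inserted_ads = 0
--     zeros = 0
--
--     if feed_items[0] == 0:
--         inserted_ads += 1
--
--     for i in range(len(feed_items)):
--         if feed_items[i] != 0:
--
--             if zeros > 1:
--                 inserted_ads += (zeros - 1)
--
--             if inserted_ads >= n:
--                 return True
--             zeros = 0
--         else:
--             zeros += 1
--
--
--     if feed_items[-1] == 0:
--         inserted_ads += 1
--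
--     if zeros > 1:
--         inserted_ads += (zeros - 1)
--
--     if inserted_ads >= n:
--         return True
--     else:
--         return False
-- ===== SOURCE B (Python) =====
-- def can_insert_ads(feed_items, n):
--     # An ad slot exists before the feed (if it starts with 0), after the feed
--     # (if it ends with 0), and between every adjacent pair of zeros.
--     pairs = sum(1 for prev, cur in zip(feed_items, feed_items[1:])
--                 if prev == 0 and cur == 0)
--     total = (feed_items[0] == 0) + (feed_items[-1] == 0) + pairs
--     return total >= n
-- ===== Notes on version B (the rewrite author's own statement) =====
-- stated objective: simpler
-- what changed: A's stateful single pass (zero-run counter, in-loop early return, boundary patch-ups after the loop) is replaced by one closed formula: (feed starts with 0) + (feed ends with 0) + number of adjacent zero-zero pairs, compared with n; correct because A's inserted_ads only grows, so the early return equals checking the final total, and each interior zero-run of length L contributes L-1 = its adjacent zero pairs.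
import Mathlib
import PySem

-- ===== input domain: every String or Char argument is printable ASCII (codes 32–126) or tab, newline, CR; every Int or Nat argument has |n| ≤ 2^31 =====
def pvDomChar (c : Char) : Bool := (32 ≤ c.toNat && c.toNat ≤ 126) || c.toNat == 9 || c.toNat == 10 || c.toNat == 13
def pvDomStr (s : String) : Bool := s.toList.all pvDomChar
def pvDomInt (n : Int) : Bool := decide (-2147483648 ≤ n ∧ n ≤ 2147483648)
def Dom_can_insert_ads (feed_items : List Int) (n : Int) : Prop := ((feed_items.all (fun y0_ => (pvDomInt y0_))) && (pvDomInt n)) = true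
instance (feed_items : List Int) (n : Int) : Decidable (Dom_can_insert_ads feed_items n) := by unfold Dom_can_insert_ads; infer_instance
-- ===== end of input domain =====

-- B replaces A's stateful single pass (zero-run counter, early return, boundary patch-ups)
-- by one formula: boundary zeros plus the number of adjacent zero–zero pairs; objective: simpler.

-- ===== PORT A =====
-- the for-loop of A: state (inserted_ads, zeros); Sum.inl true = the in-loop 'return True'
def canAdsLoop (n : Int) : List Int → Int → Int → Bool ⊕ (Int × Int)
  | [], ins, zeros => Sum.inr (ins, zeros)
  | x :: xs, ins, zeros =>
    if x ≠ 0 then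
      let ins' := if zeros > 1 then ins + (zeros - 1) else ins
      if ins' ≥ n then Sum.inl true
      else canAdsLoop n xs ins' 0
    else canAdsLoop n xs ins (zeros + 1)

def can_insert_ads (feed_items : List Int) (n : Int) : Bool :=
  match PySem.List.pyGet? feed_items 0, PySem.List.pyGet? feed_items (-1) with
  | some first, some last =>
      let ins0 : Int := if first = 0 then 1 else 0
      match canAdsLoop n feed_items ins0 0 with
      | Sum.inl b => b
      | Sum.inr (ins, zeros) =>
        let ins1 := if last = 0 then ins + 1 else ins
        let ins2 := if zeros > 1 then ins1 + (zeros - 1) else ins1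
        decide (ins2 ≥ n)
  | _, _ => false  -- empty list: Python raises IndexError (excluded by Pre_)

-- ===== PORT B =====
def can_insert_ads_alt (feed_items : List Int) (n : Int) : Bool :=
  let pairs : Int :=
    (List.zip feed_items (PySem.List.slice feed_items (some 1) none)).foldl
      (fun acc p => if p.1 = 0 ∧ p.2 = 0 then acc + 1 else acc) 0
  match PySem.List.pyGet? feed_items 0 with
  | none => false  -- empty list: IndexError (excluded by Pre_)
  | some first =>
    match PySem.List.pyGet? feed_items (-1) with
    | none => false
    | some last =>
        decide ((if first = 0 then (1:Int) else 0) + (if last = 0 then (1:Int) else 0) + pairs ≥ n)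

-- ===== PRECONDITION & SPEC =====
-- Pre_ excludes only the empty list, on which Python A raises IndexError at feed_items[0].
def Pre_can_insert_ads (feed_items : List Int) (n : Int) : Prop := feed_items ≠ []
instance (feed_items : List Int) (n : Int) : Decidable (Pre_can_insert_ads feed_items n) := by unfold Pre_can_insert_ads; infer_instance
def pvWitness_can_insert_ads : List Int × Int := ([0, 1, 0, 0, 3], 2)

def Spec_can_insert_ads (feed_items : List Int) (n : Int) (out : Bool) : Prop := out = can_insert_ads_alt feed_items n
instance (feed_items : List Int) (n : Int) (out : Bool) : Decidable (Spec_can_insert_ads feed_items n out) := by unfold Spec_can_insert_ads; infer_instance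

-- ===== CLAIM (what is proved, stated in full; the proofs are below) =====
def Claim_equal_can_insert_ads : Prop := ∀ (feed_items : List Int) (n : Int), Dom_can_insert_ads feed_items n → Pre_can_insert_ads feed_items n → Spec_can_insert_ads feed_items n (can_insert_ads feed_items n)

-- ===== LEMMAS AND PROOFS =====

-- the loop of A with the early return removed
def gLoop : List Int → Int × Int → Int × Int
  | [], s => s
  | x :: xs, (ins, zeros) =>
    if x ≠ 0 then gLoop xs ((if zeros > 1 then ins + (zeros - 1) else ins), 0)
    else gLoop xs (ins, zeros + 1)

-- the post-run contribution of a pending zero run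
def adj (z : Int) : Int := if z > 1 then z - 1 else 0

-- count of adjacent zero–zero pairs, with a flag 'previous element was zero'
def cPairs : List Int → Bool → Int
  | [], _ => 0
  | x :: xs, p => (if x = 0 ∧ p = true then 1 else 0) + cPairs xs (decide (x = 0))

theorem gLoop_z_nonneg (xs : List Int) (ins z : Int) (hz : 0 ≤ z) :
    0 ≤ (gLoop xs (ins, z)).2 := by
  induction xs generalizing ins z with
  | nil => simpa [gLoop] using hz
  | cons x xs ih =>
    by_cases hx : x = 0
    · simp only [gLoop, hx]
      simpa using ih ins (z + 1) (by omega)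
    · simp only [gLoop, hx, ne_eq, not_false_iff, if_pos]
      exact ih _ 0 le_rfl

theorem gLoop_mono (xs : List Int) (ins z : Int) (hz : 0 ≤ z) :
    ins ≤ (gLoop xs (ins, z)).1 := by
  induction xs generalizing ins z with
  | nil => simp [gLoop]
  | cons x xs ih =>
    by_cases hx : x = 0
    · simp only [gLoop, hx]
      simpa using ih ins (z + 1) (by omega)
    · simp only [gLoop, hx, ne_eq, not_false_iff, if_pos]
      have h1 := ih (if z > 1 then ins + (z - 1) else ins) 0 le_rfl
      have : ins ≤ (if z > 1 then ins + (z - 1) else ins) := by split_ifs <;> omega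
      omega

-- characterisation of the early-return loop by the plain loop
theorem canAdsLoop_char (xs : List Int) (n ins z : Int) (hz : 0 ≤ z) :
    (∀ b, canAdsLoop n xs ins z = Sum.inl b → b = true ∧ n ≤ (gLoop xs (ins, z)).1) ∧
    (∀ s, canAdsLoop n xs ins z = Sum.inr s → s = gLoop xs (ins, z)) := by
  induction xs generalizing ins z with
  | nil =>
    constructor
    · intro b h; simp [canAdsLoop] at h
    · intro s h; simpa [canAdsLoop, gLoop] using h.symm
  | cons x xs ih =>
    by_cases hx : x = 0
    · simpa [canAdsLoop, gLoop, hx] using ih ins (z + 1) (by omega)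
    · set ins' := if z > 1 then ins + (z - 1) else ins with hins'
      by_cases hret : ins' ≥ n
      · constructor
        · intro b h
          simp only [canAdsLoop, hx, ne_eq, not_false_iff, if_pos, if_pos hret, ← hins'] at h
          refine ⟨by simpa using h.symm, ?_⟩
          have := gLoop_mono xs ins' 0 le_rfl
          simp only [gLoop, hx, ne_eq, not_false_iff, if_pos, ← hins']
          omega
        · intro s h
          simp [canAdsLoop, hx, ← hins', hret] at h
      · have := ih ins' 0 le_rfl
        constructor
        · intro b h
          simp only [canAdsLoop, hx, ne_eq, not_false_iff, if_pos, if_neg hret, ← hins'] at h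
          simpa [gLoop, hx, ← hins'] using this.1 b h
        · intro s h
          simp only [canAdsLoop, hx, ne_eq, not_false_iff, if_pos, if_neg hret, ← hins'] at h
          simpa [gLoop, hx, ← hins'] using this.2 s h

theorem adj_succ (z : Int) (hz : 0 ≤ z) :
    adj (z + 1) = adj z + (if 0 < z then 1 else 0) := by
  simp only [adj]; split_ifs <;> omega

-- the closed form of the plain loop's final total
theorem gLoop_total (xs : List Int) (ins z : Int) (hz : 0 ≤ z) :
    (gLoop xs (ins, z)).1 + adj (gLoop xs (ins, z)).2
      = ins + adj z + cPairs xs (decide (0 < z)) := by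
  induction xs generalizing ins z with
  | nil => simp [gLoop, cPairs]
  | cons x xs ih =>
    by_cases hx : x = 0
    · simp only [gLoop, hx, ne_eq, not_true_eq_false, if_neg, not_false_iff]
      have h1 := ih ins (z + 1) (by omega)
      have h2 := adj_succ z hz
      simp only [cPairs]
      have hp : decide (0 < z + 1) = true := by simp; omega
      rw [hp] at h1
      split_ifs with hzp <;> simp_all <;> try omega
    · simp only [gLoop, hx, ne_eq, not_false_iff, if_pos]
      have h1 := ih (if z > 1 then ins + (z - 1) else ins) 0 le_rfl
      simp only [cPairs, hx, adj] at h1 ⊢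
      split_ifs at h1 ⊢ <;> simp_all <;> omega

-- B's fold over zipped neighbours equals cPairs
theorem pairs_fold (xs : List Int) (x acc : Int) :
    (List.zip (x :: xs) xs).foldl
      (fun acc p => if p.1 = 0 ∧ p.2 = 0 then acc + 1 else acc) acc
      = acc + cPairs xs (decide (x = 0)) := by
  induction xs generalizing x acc with
  | nil => simp [cPairs]
  | cons y ys ih =>
    simp only [List.zip_cons_cons, List.foldl_cons]
    rw [ih y]
    simp only [cPairs]
    by_cases hx : x = 0 <;> by_cases hy : y = 0 <;> simp [hx, hy] <;> try omega

-- ===== VERDICT (by name: the statement is the Claim_ definition above) =====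
theorem can_insert_ads_spec : Claim_equal_can_insert_ads := by
  intro feed n _ hpre
  unfold Spec_can_insert_ads
  obtain ⟨x, xs, rfl⟩ : ∃ x xs, feed = x :: xs := by
    cases feed with
    | nil => exact absurd rfl hpre
    | cons a l => exact ⟨a, l, rfl⟩
  unfold can_insert_ads can_insert_ads_alt
  simp only [PySem.List.pyGet?_zero_cons, PySem.List.slice_from_one, List.tail_cons]
  rw [pairs_fold xs x 0]
  obtain ⟨last, hlast⟩ : ∃ v, PySem.List.pyGet? (x :: xs) (-1) = some v := by
    rw [PySem.List.pyGet?_neg_one]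
    cases h : (x :: xs).getLast? with
    | none => simp at h
    | some v => exact ⟨v, rfl⟩
  rw [hlast]
  have hc := canAdsLoop_char (x :: xs) n (if x = 0 then (1:Int) else 0) 0 le_rfl
  have htot := gLoop_total (x :: xs) (if x = 0 then (1:Int) else 0) 0 le_rfl
  have hz := gLoop_z_nonneg (x :: xs) (if x = 0 then (1:Int) else 0) 0 le_rfl
  have e0 : adj 0 = 0 := by simp [adj]
  rw [e0] at htot
  simp only [cPairs] at htot
  have e1 : (if x = 0 ∧ (0:Int) < 0 then (1:Int) else 0) = 0 := by simp
  have hbl : 0 ≤ (if last = 0 then (1:Int) else 0) := by split_ifs <;> omega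
  have hadj0 : 0 ≤ adj (gLoop (x :: xs) ((if x = 0 then (1:Int) else 0), 0)).2 := by
    simp only [adj]; split_ifs <;> omega
  cases hres : canAdsLoop n (x :: xs) (if x = 0 then (1:Int) else 0) 0 with
  | inl b =>
    obtain ⟨hb, hn⟩ := hc.1 b hres
    subst hb
    simp only [hres]
    symm
    rw [decide_eq_true_eq]
    simp only [decide_eq_true_eq] at htot
    rw [e1] at htot
    omega
  | inr s =>
    obtain ⟨ins, zeros⟩ := s
    have hs := hc.2 (ins, zeros) hres
    rw [Prod.ext_iff] at hs
    obtain ⟨h1, h2⟩ := hs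
    subst h1; subst h2
    simp only [hres]
    have hE : (if (gLoop (x :: xs) ((if x = 0 then (1:Int) else 0), 0)).2 > 1 then
          (if last = 0 then (gLoop (x :: xs) ((if x = 0 then (1:Int) else 0), 0)).1 + 1
            else (gLoop (x :: xs) ((if x = 0 then (1:Int) else 0), 0)).1)
            + ((gLoop (x :: xs) ((if x = 0 then (1:Int) else 0), 0)).2 - 1)
        else (if last = 0 then (gLoop (x :: xs) ((if x = 0 then (1:Int) else 0), 0)).1 + 1
            else (gLoop (x :: xs) ((if x = 0 then (1:Int) else 0), 0)).1))
        = (gLoop (x :: xs) ((if x = 0 then (1:Int) else 0), 0)).1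
          + (if last = 0 then (1:Int) else 0)
          + adj (gLoop (x :: xs) ((if x = 0 then (1:Int) else 0), 0)).2 := by
      simp only [adj]; split_ifs <;> omega
    rw [hE, decide_eq_decide]
    simp only [decide_eq_true_eq] at htot
    rw [e1] at htot
    omega
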